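-- pv_equiv track=rewrite | github.com/Ayleovelle/astrbot_plugin_emotional_state | personality_drift_engine.py | _event_type
-- ===== SOURCE A (Python) =====
-- def _event_type(flags: list[str]) -> str:
--     for flag, event_type in (
--         ("conflict_or_hurt_event", "conflict_or_hurt"),
--         ("repair_or_self_correction_event", "repair_or_self_correction"),
--         ("boundary_event", "boundary"),
--         ("warmth_or_trust_event", "warmth_or_trust"),
--         ("shared_learning_event", "shared_learning"),
--         ("pressure_or_overload_event", "pressure_or_overload"),
--     ):
--         if flag in flags:
--             return event_type
--     return "low_signal"
-- ===== SOURCE B (Python) =====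
-- _TABLE = {
--     "conflict_or_hurt_event": (0, "conflict_or_hurt"),
--     "repair_or_self_correction_event": (1, "repair_or_self_correction"),
--     "boundary_event": (2, "boundary"),
--     "warmth_or_trust_event": (3, "warmth_or_trust"),
--     "shared_learning_event": (4, "shared_learning"),
--     "pressure_or_overload_event": (5, "pressure_or_overload"),
-- }
--
--
-- def _event_type(flags: list[str]) -> str:
--     best_i, best_e = 6, "low_signal"
--     for f in flags:
--         hit = _TABLE.get(f)
--         if hit is not None and hit[0] < best_i:
--             best_i, best_e = hit
--     return best_e
-- ===== Notes on version B (the rewrite author's own statement) =====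
-- stated objective: alternative
-- what changed: B iterates once over the input flags with a table lookup and a running minimum priority index, instead of A's scan over the fixed priority order with a membership test into flags for each candidate.
import Mathlib
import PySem

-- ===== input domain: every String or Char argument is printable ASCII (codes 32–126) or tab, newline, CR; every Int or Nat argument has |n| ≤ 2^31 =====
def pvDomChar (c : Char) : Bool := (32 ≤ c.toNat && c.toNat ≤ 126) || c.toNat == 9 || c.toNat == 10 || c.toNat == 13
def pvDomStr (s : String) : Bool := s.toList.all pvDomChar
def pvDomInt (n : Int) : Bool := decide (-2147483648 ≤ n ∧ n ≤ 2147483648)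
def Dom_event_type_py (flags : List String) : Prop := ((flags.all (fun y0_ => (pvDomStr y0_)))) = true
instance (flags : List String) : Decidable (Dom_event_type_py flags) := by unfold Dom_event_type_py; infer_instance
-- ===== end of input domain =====

-- B replaces A's scan over the fixed priority order (membership test per candidate) by a single
-- pass over the input flags with a table lookup and a running minimum priority index (alternative, same speed).

-- ===== PORT A =====
-- A iterates over the fixed 6-pair tuple and returns at the first flag present in `flags`;
-- transliterated as the corresponding chain of membership tests in the same order.
def event_type_py (flags : List String) : String :=
  if flags.contains "conflict_or_hurt_event" then "conflict_or_hurt"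
  else if flags.contains "repair_or_self_correction_event" then "repair_or_self_correction"
  else if flags.contains "boundary_event" then "boundary"
  else if flags.contains "warmth_or_trust_event" then "warmth_or_trust"
  else if flags.contains "shared_learning_event" then "shared_learning"
  else if flags.contains "pressure_or_overload_event" then "pressure_or_overload"
  else "low_signal"

-- ===== PORT B =====
def pvTable : PySem.Dict String (Nat × String) :=
  PySem.Dict.ofList
    [ ("conflict_or_hurt_event", (0, "conflict_or_hurt")),
      ("repair_or_self_correction_event", (1, "repair_or_self_correction")),
      ("boundary_event", (2, "boundary")),
      ("warmth_or_trust_event", (3, "warmth_or_trust")),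
      ("shared_learning_event", (4, "shared_learning")),
      ("pressure_or_overload_event", (5, "pressure_or_overload")) ]

def pvStep (acc : Nat × String) (f : String) : Nat × String :=
  match pvTable.get? f with
  | some hit => if hit.1 < acc.1 then hit else acc
  | none => acc

def event_type_py_alt (flags : List String) : String :=
  (flags.foldl pvStep (6, "low_signal")).2

-- ===== PRECONDITION & SPEC =====
def Spec_event_type_py (flags : List String) (out : String) : Prop := out = event_type_py_alt flags
instance (flags : List String) (out : String) : Decidable (Spec_event_type_py flags out) := by unfold Spec_event_type_py; infer_instance

-- ===== CLAIM (what is proved, stated in full; the proofs are below) =====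
def Claim_equal_event_type_py : Prop := ∀ (flags : List String), Dom_event_type_py flags → Spec_event_type_py flags (event_type_py flags)

-- ===== LEMMAS AND PROOFS =====

-- priority index of a flag (6 = not in the table)
def pvIdx (f : String) : Nat :=
  if f = "conflict_or_hurt_event" then 0
  else if f = "repair_or_self_correction_event" then 1
  else if f = "boundary_event" then 2
  else if f = "warmth_or_trust_event" then 3
  else if f = "shared_learning_event" then 4
  else if f = "pressure_or_overload_event" then 5
  else 6

-- event type for a priority index
def pvEt (k : Nat) : String :=
  match k with
  | 0 => "conflict_or_hurt"
  | 1 => "repair_or_self_correction"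
  | 2 => "boundary"
  | 3 => "warmth_or_trust"
  | 4 => "shared_learning"
  | 5 => "pressure_or_overload"
  | _ => "low_signal"

-- minimum priority index over a list, starting from i
def pvMin (i : Nat) (flags : List String) : Nat :=
  flags.foldl (fun b f => min b (pvIdx f)) i

-- A's contains-chain, as an index
def pvC (flags : List String) : Nat :=
  if flags.contains "conflict_or_hurt_event" then 0
  else if flags.contains "repair_or_self_correction_event" then 1
  else if flags.contains "boundary_event" then 2
  else if flags.contains "warmth_or_trust_event" then 3
  else if flags.contains "shared_learning_event" then 4
  else if flags.contains "pressure_or_overload_event" then 5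
  else 6

theorem pvIdx_le (f : String) : pvIdx f ≤ 6 := by
  unfold pvIdx; split_ifs <;> omega

theorem pvStep_eq (acc : Nat × String) (f : String) (hacc : acc.1 ≤ 6) :
    pvStep acc f = if pvIdx f < acc.1 then (pvIdx f, pvEt (pvIdx f)) else acc := by
  by_cases h0 : f = "conflict_or_hurt_event"
  · subst h0
    have hget : pvTable.get? "conflict_or_hurt_event" = some (0, "conflict_or_hurt") := rfl
    simp [pvStep, hget, pvIdx, pvEt]
  · by_cases h1 : f = "repair_or_self_correction_event"
    · subst h1
      have hget : pvTable.get? "repair_or_self_correction_event" = some (1, "repair_or_self_correction") := rfl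
      simp [pvStep, hget, pvIdx, pvEt]
    · by_cases h2 : f = "boundary_event"
      · subst h2
        have hget : pvTable.get? "boundary_event" = some (2, "boundary") := rfl
        simp [pvStep, hget, pvIdx, h1, pvEt]
      · by_cases h3 : f = "warmth_or_trust_event"
        · subst h3
          have hget : pvTable.get? "warmth_or_trust_event" = some (3, "warmth_or_trust") := rfl
          simp [pvStep, hget, pvIdx, h1, h2, pvEt]
        · by_cases h4 : f = "shared_learning_event"
          · subst h4
            have hget : pvTable.get? "shared_learning_event" = some (4, "shared_learning") := rfl
            simp [pvStep, hget, pvIdx, h1, h2, h3, pvEt]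
          · by_cases h5 : f = "pressure_or_overload_event"
            · subst h5
              have hget : pvTable.get? "pressure_or_overload_event" = some (5, "pressure_or_overload") := rfl
              simp [pvStep, hget, pvIdx, h1, h2, h3, h4, pvEt]
            · have hitems : pvTable.items =
                [ ("conflict_or_hurt_event", (0, "conflict_or_hurt")),
                  ("repair_or_self_correction_event", (1, "repair_or_self_correction")),
                  ("boundary_event", (2, "boundary")),
                  ("warmth_or_trust_event", (3, "warmth_or_trust")),
                  ("shared_learning_event", (4, "shared_learning")),
                  ("pressure_or_overload_event", (5, "pressure_or_overload")) ] := rfl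
              have hlt : ¬ ((6 : Nat) < acc.1) := by omega
              have g0 : (("conflict_or_hurt_event" : String) == f) = false := beq_eq_false_iff_ne.mpr (Ne.symm h0)
              have g1 : (("repair_or_self_correction_event" : String) == f) = false := beq_eq_false_iff_ne.mpr (Ne.symm h1)
              have g2 : (("boundary_event" : String) == f) = false := beq_eq_false_iff_ne.mpr (Ne.symm h2)
              have g3 : (("warmth_or_trust_event" : String) == f) = false := beq_eq_false_iff_ne.mpr (Ne.symm h3)
              have g4 : (("shared_learning_event" : String) == f) = false := beq_eq_false_iff_ne.mpr (Ne.symm h4)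
              have g5 : (("pressure_or_overload_event" : String) == f) = false := beq_eq_false_iff_ne.mpr (Ne.symm h5)
              simp [pvStep, PySem.Dict.get?, hitems, List.find?, pvIdx,
                    h0, h1, h2, h3, h4, h5, g0, g1, g2, g3, g4, g5, hlt]

theorem pvFold_eq (flags : List String) : ∀ (i : Nat), i ≤ 6 →
    flags.foldl pvStep (i, pvEt i) = (pvMin i flags, pvEt (pvMin i flags)) := by
  induction flags with
  | nil => intro i _; simp [pvMin]
  | cons f rest ih =>
    intro i hi
    have hstep : pvStep (i, pvEt i) f = (min i (pvIdx f), pvEt (min i (pvIdx f))) := by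
      rw [pvStep_eq _ _ hi]
      by_cases h : pvIdx f < i
      · simp [h, Nat.min_eq_right (Nat.le_of_lt h)]
      · have : min i (pvIdx f) = i := Nat.min_eq_left (Nat.le_of_not_lt h)
        simp [h, this]
    have hle : min i (pvIdx f) ≤ 6 := by
      have := pvIdx_le f; omega
    show rest.foldl pvStep (pvStep (i, pvEt i) f) = _
    rw [hstep, ih (min i (pvIdx f)) hle]
    simp [pvMin, List.foldl_cons]

theorem pvMin_min (flags : List String) : ∀ (a b : Nat),
    pvMin (min a b) flags = min a (pvMin b flags) := by
  induction flags with
  | nil => intro a b; simp [pvMin]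
  | cons f rest ih =>
    intro a b
    simp only [pvMin, List.foldl_cons] at *
    rw [Nat.min_assoc, ih a (min b (pvIdx f))]

theorem pvC_cons (f : String) (rest : List String) :
    pvC (f :: rest) = min (pvIdx f) (pvC rest) := by
  by_cases h0 : f = "conflict_or_hurt_event"
  · subst h0; simp [pvC, pvIdx]
  · by_cases h1 : f = "repair_or_self_correction_event"
    · subst h1; simp only [pvC, pvIdx, List.contains_cons]
      simp; split_ifs <;> omega
    · by_cases h2 : f = "boundary_event"
      · subst h2; simp only [pvC, pvIdx, List.contains_cons]
        simp; split_ifs <;> omega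
      · by_cases h3 : f = "warmth_or_trust_event"
        · subst h3; simp only [pvC, pvIdx, List.contains_cons]
          simp; split_ifs <;> omega
        · by_cases h4 : f = "shared_learning_event"
          · subst h4; simp only [pvC, pvIdx, List.contains_cons]
            simp; split_ifs <;> omega
          · by_cases h5 : f = "pressure_or_overload_event"
            · subst h5; simp only [pvC, pvIdx, List.contains_cons]
              simp; split_ifs <;> omega
            · simp only [pvC, pvIdx, List.contains_cons]
              simp [h0, h1, h2, h3, h4, h5,
                    Ne.symm h0, Ne.symm h1, Ne.symm h2, Ne.symm h3, Ne.symm h4, Ne.symm h5]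
              split_ifs <;> omega

theorem pvMin_eq_pvC (flags : List String) : pvMin 6 flags = pvC flags := by
  induction flags with
  | nil => simp [pvMin, pvC]
  | cons f rest ih =>
    have : pvMin 6 (f :: rest) = pvMin (min 6 (pvIdx f)) rest := by
      simp [pvMin, List.foldl_cons]
    rw [this, Nat.min_comm 6 (pvIdx f), pvMin_min, pvC_cons, ih]

theorem eventA_eq (flags : List String) : event_type_py flags = pvEt (pvC flags) := by
  unfold event_type_py pvC
  split_ifs <;> rfl

-- ===== VERDICT (by name: the statement is the Claim_ definition above) =====
theorem event_type_py_spec : Claim_equal_event_type_py := by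
  intro flags _
  show event_type_py flags = event_type_py_alt flags
  have h6 : pvEt 6 = "low_signal" := rfl
  unfold event_type_py_alt
  rw [← h6, pvFold_eq flags 6 (by omega), pvMin_eq_pvC, eventA_eq]
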